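-- pv_equiv track=rewrite | github.com/kimdahee7/CodingTest_Python | 프로그래머스/1/131128. 숫자 짝꿍/숫자 짝꿍.py | solution
-- ===== SOURCE A (Python) =====
-- def solution(X, Y):
--     answer = ''
--     result = {}
--     l = []
--     for i in X:
--         if i in result:
--             result[i] += 1
--         else:
--             result[i] =1
--     for i in Y:
--         if i in result and result[i] != 0:
--             l.append(i)
--             result[i] -=1
--     if len(l) == 0:
--         return "-1"
--     elif set(l) == {"0"}:
--         return "0"
--     else:
--         l.sort(reverse=True)
--     for i in l:
--         answer += i
--     return answer
-- ===== SOURCE B (Python) =====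
-- def solution(X, Y):
--     cx = {}
--     for c in X:
--         cx[c] = cx.get(c, 0) + 1
--     cy = {}
--     for c in Y:
--         cy[c] = cy.get(c, 0) + 1
--     pieces = []
--     for c in sorted(cx, reverse=True):
--         if c in cy:
--             pieces.append(c * min(cx[c], cy[c]))
--     s = ''.join(pieces)
--     if not s:
--         return "-1"
--     if s == '0' * len(s):
--         return "0"
--     return s
-- ===== Notes on version B (the rewrite author's own statement) =====
-- stated objective: faster
-- what changed: A simulates the pairing by decrementing a leftover counter while scanning Y and then sorts the collected list; B counts each string once, takes the per-character minimum over the common keys in descending key order, and emits each character as a block, so no sort of the (length-min(n,m)) result list is needed.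
import Mathlib
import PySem

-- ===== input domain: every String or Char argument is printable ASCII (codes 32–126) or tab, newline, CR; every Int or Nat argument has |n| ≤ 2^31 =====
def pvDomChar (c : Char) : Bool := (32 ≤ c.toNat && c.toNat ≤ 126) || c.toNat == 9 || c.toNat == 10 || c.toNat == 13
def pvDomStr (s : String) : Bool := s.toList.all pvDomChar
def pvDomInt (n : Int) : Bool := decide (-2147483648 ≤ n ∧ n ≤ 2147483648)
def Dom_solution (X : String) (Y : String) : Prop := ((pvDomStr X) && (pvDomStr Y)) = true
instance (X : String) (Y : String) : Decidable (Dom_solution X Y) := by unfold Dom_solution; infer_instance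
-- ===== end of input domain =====

-- B counts each string once and emits the per-character minimum in descending key order,
-- avoiding A's sort of the matched-character list (objective: faster).

-- ===== PORT A =====
def solution (X : String) (Y : String) : String :=
  let result : PySem.Dict Char Int :=
    X.toList.foldl (fun r i => if r.contains i then r.modify i 0 (· + 1) else r.insert i 1)
      PySem.Dict.empty
  let st : PySem.Dict Char Int × List Char :=
    Y.toList.foldl
      (fun s i => if s.1.contains i ∧ s.1.getD i 0 ≠ 0 then (s.1.modify i 0 (· - 1), s.2 ++ [i])
                  else s)
      (result, [])
  let l := st.2
  if l.length = 0 then "-1"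
  else if PySem.Set.equal (PySem.Set.ofList l) (PySem.Set.ofList ['0']) then "0"
  else
    let l2 := PySem.List.sorted l (fun x => x) true
    String.ofList (l2.foldl (fun answer i => answer ++ [i]) [])

-- ===== PORT B =====
def solution_alt (X : String) (Y : String) : String :=
  let cx : PySem.Dict Char Int :=
    X.toList.foldl (fun d c => d.insert c (d.getD c 0 + 1)) PySem.Dict.empty
  let cy : PySem.Dict Char Int :=
    Y.toList.foldl (fun d c => d.insert c (d.getD c 0 + 1)) PySem.Dict.empty
  let pieces : List (List Char) :=
    (PySem.List.sorted cx.keys (fun x => x) true).foldl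
      (fun acc c =>
        if cy.contains c then
          acc ++ [List.replicate (min (cx.getD c 0) (cy.getD c 0)).toNat c]
        else acc)
      []
  let s : List Char := pieces.flatten
  if s = [] then "-1"
  else if s = List.replicate s.length '0' then "0"
  else String.ofList s

-- ===== PRECONDITION & SPEC =====
def Spec_solution (X : String) (Y : String) (out : String) : Prop := out = solution_alt X Y
instance (X : String) (Y : String) (out : String) : Decidable (Spec_solution X Y out) := by unfold Spec_solution; infer_instance

-- ===== CLAIM (what is proved, stated in full; the proofs are below) =====
def Claim_equal_solution : Prop := ∀ (X : String) (Y : String), Dom_solution X Y → Spec_solution X Y (solution X Y)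

-- ===== LEMMAS AND PROOFS =====

theorem pvCountStepA (d : PySem.Dict Char Int) (c : Char) :
    (if d.contains c then d.modify c 0 (· + 1) else d.insert c 1) = d.modify c 0 (· + 1) := by
  by_cases h : d.contains c
  · simp [h]
  · have h0 : d.getD c 0 = 0 :=
      PySem.Dict.getD_of_not_contains d 0 (by simpa using h)
    have h2 : d.modify c 0 (· + 1) = d.insert c (d.getD c 0 + 1) := by
      simp [PySem.Dict.modify]
    rw [h2, h0]
    simp [h]

theorem pvLoopA (ys : List Char) (d : PySem.Dict Char Int) (l : List Char)
    (hd : ∀ c, 0 ≤ d.getD c 0 ∧ (d.contains c = false → d.getD c 0 = 0)) (c : Char) :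
    ((ys.foldl
      (fun s i => if s.1.contains i ∧ s.1.getD i 0 ≠ 0 then (s.1.modify i 0 (· - 1), s.2 ++ [i])
                  else s) (d, l)).2).count c
      = l.count c + min (ys.count c) (d.getD c 0).toNat := by
  induction ys generalizing d l with
  | nil => simp
  | cons y t ih =>
    by_cases hc : d.contains y ∧ d.getD y 0 ≠ 0
    · have hpos : 0 < d.getD y 0 := lt_of_le_of_ne (hd y).1 (Ne.symm hc.2)
      have hd' : ∀ c', 0 ≤ (d.modify y 0 (· - 1)).getD c' 0 ∧
          ((d.modify y 0 (· - 1)).contains c' = false → (d.modify y 0 (· - 1)).getD c' 0 = 0) := by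
        intro c'
        rw [PySem.Dict.getD_modify]
        constructor
        · split_ifs with hcy
          · omega
          · exact (hd c').1
        · intro hcc
          rw [PySem.Dict.contains_modify] at hcc
          split_ifs with hcy
          · subst hcy; simp at hcc
          · exact (hd c').2 (by simpa [hcy] using hcc)
      simp only [List.foldl_cons, if_pos hc]
      rw [ih _ _ hd', PySem.Dict.getD_modify]
      by_cases hcy : c = y
      · subst hcy
        simp only [List.count_append, List.count_cons, if_pos rfl]
        simp
        omega
      · simp [List.count_append, List.count_cons, Ne.symm hcy, hcy]
    · have h0 : d.getD y 0 = 0 := by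
        by_cases hcon : d.contains y
        · by_contra hne
          exact hc ⟨hcon, hne⟩
        · exact (hd y).2 (by simpa using hcon)
      simp only [List.foldl_cons, if_neg hc]
      rw [ih d l hd]
      by_cases hcy : c = y
      · subst hcy; simp [List.count_cons, h0]
      · simp [List.count_cons, Ne.symm hcy]

theorem pvFlattenCount (ks : List Char) (m : Char → Nat) (hk : ks.Nodup) (c : Char) :
    ((ks.map (fun k => List.replicate (m k) k)).flatten).count c
      = if c ∈ ks then m c else 0 := by
  induction ks with
  | nil => simp
  | cons k t ih =>
    simp only [List.map_cons, List.flatten_cons, List.count_append, List.count_replicate,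
      List.mem_cons]
    rw [ih (List.nodup_cons.mp hk).2]
    by_cases hck : c = k
    · subst hck
      have hnm := (List.nodup_cons.mp hk).1
      simp [hnm]
    · have hkc : ¬k = c := fun h => hck h.symm
      simp [hck, hkc]

theorem pvFlattenPairwise (ks : List Char) (m : Char → Nat)
    (hk : ks.Pairwise (fun a b => b < a)) :
    ((ks.map (fun k => List.replicate (m k) k)).flatten).Pairwise (fun a b => b ≤ a) := by
  induction ks with
  | nil => simp
  | cons k t ih =>
    simp only [List.map_cons, List.flatten_cons]
    rw [List.pairwise_append]
    refine ⟨List.pairwise_replicate.mpr (Or.inr (le_refl k)),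
      ih (List.pairwise_cons.mp hk).2, ?_⟩
    intro x hx y hy
    rcases List.eq_of_mem_replicate hx with rfl
    rcases List.mem_flatten.mp hy with ⟨blk, hblk, hyb⟩
    rcases List.mem_map.mp hblk with ⟨q, hq, rfl⟩
    rcases List.eq_of_mem_replicate hyb with rfl
    exact le_of_lt ((List.pairwise_cons.mp hk).1 _ hq)

theorem pvMain (xs ys : List Char) :
    (let result : PySem.Dict Char Int :=
      xs.foldl (fun r i => if r.contains i then r.modify i 0 (· + 1) else r.insert i 1)
        PySem.Dict.empty
    let st : PySem.Dict Char Int × List Char :=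
      ys.foldl
        (fun s i => if s.1.contains i ∧ s.1.getD i 0 ≠ 0 then (s.1.modify i 0 (· - 1), s.2 ++ [i])
                    else s)
        (result, [])
    let l := st.2
    if l.length = 0 then "-1"
    else if PySem.Set.equal (PySem.Set.ofList l) (PySem.Set.ofList ['0']) then "0"
    else
      let l2 := PySem.List.sorted l (fun x => x) true
      String.ofList (l2.foldl (fun answer i => answer ++ [i]) []))
    =
    (let cx : PySem.Dict Char Int :=
      xs.foldl (fun d c => d.insert c (d.getD c 0 + 1)) PySem.Dict.empty
    let cy : PySem.Dict Char Int :=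
      ys.foldl (fun d c => d.insert c (d.getD c 0 + 1)) PySem.Dict.empty
    let pieces : List (List Char) :=
      (PySem.List.sorted cx.keys (fun x => x) true).foldl
        (fun acc c =>
          if cy.contains c then
            acc ++ [List.replicate (min (cx.getD c 0) (cy.getD c 0)).toNat c]
          else acc)
        []
    let s : List Char := pieces.flatten
    if s = [] then "-1"
    else if s = List.replicate s.length '0' then "0"
    else String.ofList s) := by
  dsimp only
  -- A's first dict is the counter
  rw [PySem.List.foldl_congr_mem _ _ (fun d c => d.modify c 0 (· + 1)) _
      (fun acc x _ => pvCountStepA acc x),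
    ← PySem.Dict.counter_eq_foldl,
    PySem.Dict.foldl_insert_getD_add_one_eq_counter,
    PySem.Dict.foldl_insert_getD_add_one_eq_counter,
    PySem.Dict.keys_counter]
  set l := (ys.foldl
      (fun s i => if s.1.contains i ∧ s.1.getD i 0 ≠ 0 then (s.1.modify i 0 (· - 1), s.2 ++ [i])
                  else s) (PySem.Dict.counter xs, ([] : List Char))).2 with hl
  set m : Char → Nat := fun c => min (ys.count c) (xs.count c) with hm
  -- counts in l
  have hlc : ∀ c, l.count c = m c := by
    intro c
    rw [hl, pvLoopA ys (PySem.Dict.counter xs) [] ?_ c]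
    · simp [PySem.Dict.getD_counter, hm]
    · intro c'
      refine ⟨by simp [PySem.Dict.getD_counter], fun hnc => ?_⟩
      rw [PySem.Dict.contains_counter] at hnc
      simp [PySem.Dict.getD_counter, List.count_eq_zero_of_not_mem (by simpa using hnc)]
  -- B's pieces
  rw [PySem.List.foldl_append_if
      (fun c => (PySem.Dict.counter ys).contains c)
      (fun c => List.replicate (min ((PySem.Dict.counter xs).getD c 0)
          ((PySem.Dict.counter ys).getD c 0)).toNat c)]
  set K := PySem.List.sorted (PySem.Set.ofList xs) (fun x => x) true with hK
  have hKnodup : K.Nodup :=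
    ((PySem.List.sorted_perm _ _ _).nodup_iff).mpr (PySem.Set.nodup_ofList xs)
  have hKpair : K.Pairwise (fun a b => b < a) := by
    have h1 := PySem.List.sorted_pairwise_rev (PySem.Set.ofList xs) (fun x : Char => x)
    have := List.Pairwise.and h1 hKnodup
    exact this.imp (fun {a b} h => lt_of_le_of_ne h.1 (fun hh => h.2 hh.symm))
  set F := K.filter (fun c => (PySem.Dict.counter ys).contains c) with hF
  have hFnodup : F.Nodup := hKnodup.filter _
  have hFpair : F.Pairwise (fun a b => b < a) := hKpair.filter _
  have hFmem : ∀ c, c ∈ F ↔ (c ∈ xs ∧ c ∈ ys) := by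
    intro c
    rw [hF, List.mem_filter]
    simp [hK, PySem.List.mem_sorted, PySem.Set.mem_ofList, PySem.Dict.contains_counter]
  -- normalise the mapped function to replicate (m c) c
  have hmapeq : F.map (fun c => List.replicate (min ((PySem.Dict.counter xs).getD c 0)
          ((PySem.Dict.counter ys).getD c 0)).toNat c)
        = F.map (fun k => List.replicate (m k) k) := by
    apply List.map_congr_left
    intro c _
    congr 1
    simp [PySem.Dict.getD_counter, hm]
    omega
  rw [List.nil_append, hmapeq]
  set s := (F.map (fun k => List.replicate (m k) k)).flatten with hs
  have hsc : ∀ c, s.count c = m c := by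
    intro c
    rw [hs, pvFlattenCount F m hFnodup c]
    by_cases hcm : c ∈ F
    · simp [hcm]
    · rw [if_neg hcm]
      rw [hFmem c] at hcm
      rcases not_and_or.mp hcm with h | h
      · simp [hm, List.count_eq_zero_of_not_mem h]
      · simp [hm, List.count_eq_zero_of_not_mem h]
  have hperm : l.Perm s := List.perm_iff_count.mpr (fun c => by rw [hlc c, hsc c])
  -- branch 1
  by_cases h1 : l.length = 0
  · rw [if_pos h1]
    have hse : s = [] := by
      have := hperm.length_eq
      rw [← List.length_eq_zero_iff]
      omega
    rw [if_pos hse]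
  · rw [if_neg h1]
    have hsne : ¬(s = []) := by
      have hlen := hperm.length_eq
      intro hh
      rw [hh] at hlen
      simp at hlen
      exact h1 (by simp [hlen])
    rw [if_neg hsne]
    -- branch 2
    have hb2 : (PySem.Set.equal (PySem.Set.ofList l) (PySem.Set.ofList ['0']) = true)
        ↔ (s = List.replicate s.length '0') := by
      rw [PySem.Set.equal_iff, List.eq_replicate_length]
      constructor
      · intro h b hb
        have : b ∈ l := hperm.mem_iff.mpr hb
        have := (h b).mp (by simpa [PySem.Set.mem_ofList] using this)
        simpa [PySem.Set.mem_ofList] using this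
      · intro h x
        simp only [PySem.Set.mem_ofList, List.mem_singleton]
        constructor
        · intro hx; exact h x (hperm.mem_iff.mp hx)
        · intro hx
          subst hx
          rcases List.exists_mem_of_ne_nil s hsne with ⟨y, hy⟩
          have := h y hy
          subst this
          exact hperm.mem_iff.mpr hy
    by_cases h2 : PySem.Set.equal (PySem.Set.ofList l) (PySem.Set.ofList ['0']) = true
    · rw [if_pos h2, if_pos (hb2.mp h2)]
    · rw [if_neg h2, if_neg (fun hh => h2 (hb2.mpr hh))]
      -- branch 3
      rw [PySem.List.foldl_append_singleton_eq_self, List.nil_append]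
      congr 1
      refine List.eq_of_perm_of_sorted
        (fun a b _ _ hab hba => le_antisymm hba hab)
        (PySem.List.sorted_pairwise_rev l (fun x : Char => x))
        (pvFlattenPairwise F m hFpair)
        ((PySem.List.sorted_perm l _ _).trans hperm)

-- ===== VERDICT (by name: the statement is the Claim_ definition above) =====
theorem solution_spec : Claim_equal_solution := by
  intro X Y _
  unfold Spec_solution
  exact pvMain X.toList Y.toList
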